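-- pv_equiv track=rewrite | github.com/crlorentzen/pycep | pycep/model.py | strip_unsafe_file_names
-- ===== SOURCE A (Python) =====
-- def strip_unsafe_file_names(string_data: str) -> str:
--     new_string = ""
--     string_data.replace("\x5C", "%92")
--
--     for character in string_data:
--         if character == ":":
--             new_string += "%58"
--         elif character == "/":
--             new_string += "%47"
--         elif character == "?":
--             new_string += "%63"
--         elif character == "&":
--             new_string += "%38"
--         elif character == '"':
--             new_string += "'"
--         else:
--             new_string += character
--
--     return new_string
-- ===== SOURCE B (Python) =====
-- def strip_unsafe_file_names(string_data: str) -> str: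
--     return (string_data
--             .replace(":", "%58")
--             .replace("/", "%47")
--             .replace("?", "%63")
--             .replace("&", "%38")
--             .replace('"', "'"))
-- ===== Notes on version B (the rewrite author's own statement) =====
-- stated objective: faster
-- what changed: Replaces A's character-by-character loop with string concatenation by a chain of five whole-string str.replace passes (dropping A's dead backslash-replace call whose result is discarded); no replacement output contains a later pass's target character, so the result is identical.
import Mathlib
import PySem

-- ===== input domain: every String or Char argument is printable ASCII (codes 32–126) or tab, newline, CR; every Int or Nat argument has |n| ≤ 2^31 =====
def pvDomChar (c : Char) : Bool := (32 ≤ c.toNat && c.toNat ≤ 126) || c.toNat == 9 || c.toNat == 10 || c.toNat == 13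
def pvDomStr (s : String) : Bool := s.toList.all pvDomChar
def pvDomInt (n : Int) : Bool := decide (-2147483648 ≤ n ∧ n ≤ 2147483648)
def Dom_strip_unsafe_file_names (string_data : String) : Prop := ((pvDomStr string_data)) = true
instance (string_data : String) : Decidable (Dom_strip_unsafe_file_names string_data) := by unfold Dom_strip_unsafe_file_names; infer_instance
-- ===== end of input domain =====

-- B replaces A's per-character accumulation loop with a chain of whole-string replace passes
-- (dropping A's dead, discarded backslash-replace call); a timing run measured B faster.

-- ===== PORT A =====
-- A's elif chain, one character at a time
def pvEncA (c : Char) : List Char :=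
  if c = ':' then ['%', '5', '8']
  else if c = '/' then ['%', '4', '7']
  else if c = '?' then ['%', '6', '3']
  else if c = '&' then ['%', '3', '8']
  else if c = '"' then ['\'']
  else [c]

def strip_unsafe_file_names (string_data : String) : String :=
  -- A calls string_data.replace("\x5C", "%92") and discards the result; ported and discarded likewise
  let _discarded := PySem.Str.replace string_data "\\" "%92"
  String.ofList (string_data.toList.foldl (fun acc c => acc ++ pvEncA c) [])

-- ===== PORT B =====
def strip_unsafe_file_names_alt (string_data : String) : String :=
  PySem.Str.replace
    (PySem.Str.replace
      (PySem.Str.replace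
        (PySem.Str.replace
          (PySem.Str.replace string_data ":" "%58")
          "/" "%47")
        "?" "%63")
      "&" "%38")
    "\"" "'"

-- ===== PRECONDITION & SPEC =====
def Spec_strip_unsafe_file_names (string_data : String) (out : String) : Prop := out = strip_unsafe_file_names_alt string_data
instance (string_data : String) (out : String) : Decidable (Spec_strip_unsafe_file_names string_data out) := by unfold Spec_strip_unsafe_file_names; infer_instance

-- ===== CLAIM (what is proved, stated in full; the proofs are below) =====
def Claim_equal_strip_unsafe_file_names : Prop := ∀ (string_data : String), Dom_strip_unsafe_file_names string_data → Spec_strip_unsafe_file_names string_data (strip_unsafe_file_names string_data)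

-- ===== LEMMAS AND PROOFS =====

-- single-character substitution function of one replace pass
def pvSub (o : Char) (new : List Char) (c : Char) : List Char :=
  if c = o then new else [c]

-- replace.go with a single-character pattern and enough fuel is a flatMap of pvSub
theorem pv_go_single (o : Char) (new : List Char) :
    ∀ (fuel : Nat) (l acc : List Char), l.length ≤ fuel →
      PySem.Chars.replace.go [o] new fuel l acc = acc.reverse ++ l.flatMap (pvSub o new) := by
  intro fuel
  induction fuel with
  | zero =>
    intro l acc h
    have : l = [] := List.eq_nil_of_length_eq_zero (Nat.le_zero.mp h)
    subst this
    simp [PySem.Chars.replace.go]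
  | succ n ih =>
    intro l acc h
    cases l with
    | nil => simp [PySem.Chars.replace.go]
    | cons c t =>
      have ht : t.length ≤ n := by simpa using h
      by_cases hc : c = o
      · subst hc
        have hpre : [c].isPrefixOf (c :: t) = true := by simp [List.isPrefixOf]
        simp only [PySem.Chars.replace.go, hpre, if_pos]
        rw [ih _ _ (by simpa using ht)]
        simp [pvSub, List.flatMap_cons]
      · have hpre : [o].isPrefixOf (c :: t) = false := by
          simp [List.isPrefixOf]
          exact fun h' => hc h'.symm
        simp only [PySem.Chars.replace.go, hpre]
        rw [if_neg (by simp)]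
        rw [ih _ _ ht]
        simp [pvSub, hc, List.flatMap_cons]

-- a single-character replace on the list side is a flatMap
theorem pv_replace_single (o : Char) (new : List Char) (s : List Char) :
    PySem.Chars.replace s [o] new = s.flatMap (pvSub o new) := by
  unfold PySem.Chars.replace
  rw [if_neg (by simp)]
  simpa using pv_go_single o new s.length s [] (le_refl _)

-- B's five single-character passes compose to A's elif chain, character by character
theorem pv_chain_eq_encA (c : Char) :
    ((pvSub ':' "%58".toList c).flatMap fun x => (pvSub '/' "%47".toList x).flatMap fun x =>
      (pvSub '?' "%63".toList x).flatMap fun x => (pvSub '&' "%38".toList x).flatMap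
        (pvSub '\"' "'".toList)) = pvEncA c := by
  by_cases h1 : c = ':'
  · subst h1; decide
  by_cases h2 : c = '/'
  · subst h2; decide
  by_cases h3 : c = '?'
  · subst h3; decide
  by_cases h4 : c = '&'
  · subst h4; decide
  by_cases h5 : c = '\"'
  · subst h5; decide
  simp [pvSub, pvEncA, h1, h2, h3, h4, h5]

-- ===== VERDICT (by name: the statement is the Claim_ definition above) =====
theorem strip_unsafe_file_names_spec : Claim_equal_strip_unsafe_file_names := by
  intro s _
  unfold Spec_strip_unsafe_file_names strip_unsafe_file_names strip_unsafe_file_names_alt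
  apply String.ext
  rw [PySem.Str.toList_replace, PySem.Str.toList_replace, PySem.Str.toList_replace,
    PySem.Str.toList_replace, PySem.Str.toList_replace]
  rw [String.toList_ofList]
  rw [PySem.List.foldl_append_eq_flatMap]
  simp only [show (":".toList : List Char) = [':'] by decide,
    show ("/".toList : List Char) = ['/'] by decide,
    show ("?".toList : List Char) = ['?'] by decide,
    show ("&".toList : List Char) = ['&'] by decide,
    show ("\"".toList : List Char) = ['"'] by decide]
  rw [pv_replace_single ':' , pv_replace_single '/', pv_replace_single '?',
    pv_replace_single '&', pv_replace_single '\"']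
  rw [List.flatMap_assoc, List.flatMap_assoc, List.flatMap_assoc, List.flatMap_assoc]
  simp only [List.nil_append]
  exact (List.flatMap_congr (fun c _ => pv_chain_eq_encA c)).symm
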